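-- pv_equiv track=rewrite | github.com/wogkr810/coding-test | 프로그래머스/unrated/138476. 귤 고르기/귤 고르기.py | solution
-- ===== SOURCE A (Python) =====
-- from collections import Counter,deque
--
-- def solution(k, tangerine):
--     counter = Counter(tangerine)
--     counter_sort = deque(sorted(counter.items(), key = lambda x : x[1] , reverse = True))
--     cnt = 0
--
--     while True:
--         x,y = counter_sort.popleft()
--         k -= y
--         cnt += 1
--         if k <= 0:
--             break
--
--     return cnt
-- ===== SOURCE B (Python) =====
-- from collections import Counter
--
-- def solution(k, tangerine):
--     # Bucket the counts instead of sorting them: bucket[c] = how many distinct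
--     # sizes occur exactly c times; walk c from the largest possible count down.
--     counts = Counter(tangerine)
--     bucket = Counter(counts.values())
--     cnt = 0
--     for c in range(len(tangerine), 0, -1):
--         for _ in range(bucket[c]):
--             k -= c
--             cnt += 1
--             if k <= 0:
--                 return cnt
--     return cnt
-- ===== Notes on version B (the rewrite author's own statement) =====
-- stated objective: alternative
-- what changed: Replaces the sort of (size,count) pairs and the deque-popping while-loop by a counting-sort-style bucket walk: a Counter of the counts is built and the candidate count values are visited from len(tangerine) down to 1, so no comparison sort is performed.
import Mathlib
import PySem

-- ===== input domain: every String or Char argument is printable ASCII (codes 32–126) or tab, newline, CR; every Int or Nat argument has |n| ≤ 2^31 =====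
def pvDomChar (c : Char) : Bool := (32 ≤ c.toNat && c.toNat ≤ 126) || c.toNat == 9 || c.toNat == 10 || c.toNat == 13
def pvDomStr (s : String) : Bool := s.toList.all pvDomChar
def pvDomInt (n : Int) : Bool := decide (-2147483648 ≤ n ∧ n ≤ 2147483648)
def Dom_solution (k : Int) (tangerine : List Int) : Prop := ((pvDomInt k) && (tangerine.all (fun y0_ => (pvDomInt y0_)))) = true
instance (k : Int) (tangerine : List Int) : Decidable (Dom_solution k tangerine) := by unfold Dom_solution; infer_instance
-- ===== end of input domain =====

-- B replaces the sort-then-pop loop by a counting-sort-style bucket walk over the counts; return-value equivalence on Pre_ (A raises outside it).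


-- ===== PORT A =====
-- the 'while True: x,y = counter_sort.popleft(); k -= y; cnt += 1; if k <= 0: break' loop;
-- the [] case is where Python raises IndexError (excluded by Pre_solution)
def aLoop : List (Int × Int) → Int → Int → Int
  | [], _, cnt => cnt
  | (_, y) :: rest, k, cnt =>
    if k - y ≤ 0 then cnt + 1 else aLoop rest (k - y) (cnt + 1)

def solution (k : Int) (tangerine : List Int) : Int :=
  let counter := PySem.Dict.counter tangerine
  let counter_sort := PySem.List.sorted counter.items (fun x => x.2) true
  aLoop counter_sort k 0

-- ===== PORT B =====
-- inner 'for _ in range(bucket[c])' loop; 'some r' models the early 'return cnt'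
def bInner (c : Int) : Nat → Int → Int → Option Int × Int × Int
  | 0, k, cnt => (none, k, cnt)
  | n + 1, k, cnt =>
    if k - c ≤ 0 then (some (cnt + 1), k - c, cnt + 1)
    else bInner c n (k - c) (cnt + 1)

-- outer 'for c in range(len(tangerine), 0, -1)' loop
def bOuter (bucket : PySem.Dict Int Int) : List Int → Int → Int → Int
  | [], _, cnt => cnt
  | c :: cs, k, cnt =>
    match bInner c (bucket.getD c 0).toNat k cnt with
    | (some r, _, _) => r
    | (none, k', cnt') => bOuter bucket cs k' cnt'

def solution_alt (k : Int) (tangerine : List Int) : Int :=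
  let counts := PySem.Dict.counter tangerine
  let bucket := PySem.Dict.counter counts.values
  bOuter bucket (PySem.List.pyRange (tangerine.length : Int) 0 (-1)) k 0

-- ===== PRECONDITION & SPEC =====
-- Pre_: exactly where A returns; A's deque exhausts (IndexError) iff tangerine is empty or k > len(tangerine)
def Pre_solution (k : Int) (tangerine : List Int) : Prop :=
  tangerine ≠ [] ∧ k ≤ (tangerine.length : Int)
instance (k : Int) (tangerine : List Int) : Decidable (Pre_solution k tangerine) := by unfold Pre_solution; infer_instance

def pvWitness_solution : Int × List Int := (3, [1, 2, 2, 1, 3])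

def Spec_solution (k : Int) (tangerine : List Int) (out : Int) : Prop := out = solution_alt k tangerine
instance (k : Int) (tangerine : List Int) (out : Int) : Decidable (Spec_solution k tangerine out) := by unfold Spec_solution; infer_instance

-- ===== CLAIM (what is proved, stated in full; the proofs are below) =====
def Claim_equal_solution : Prop := ∀ (k : Int) (tangerine : List Int), Dom_solution k tangerine → Pre_solution k tangerine → Spec_solution k tangerine (solution k tangerine)

-- ===== LEMMAS AND PROOFS =====

-- common abstraction: the consume loop over the flat descending list of counts
def gLoop : List Int → Int → Int → Int
  | [], _, cnt => cnt
  | c :: rest, k, cnt =>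
    if k - c ≤ 0 then cnt + 1 else gLoop rest (k - c) (cnt + 1)

theorem aLoop_eq_gLoop (ps : List (Int × Int)) : ∀ k cnt, aLoop ps k cnt = gLoop (ps.map Prod.snd) k cnt := by
  induction ps with
  | nil => intro k cnt; rfl
  | cons p rest ih =>
    intro k cnt
    obtain ⟨x, y⟩ := p
    simp only [aLoop, List.map, gLoop]
    split_ifs with h
    · rfl
    · exact ih _ _

theorem bInner_eq_gLoop (c : Int) (n : Nat) : ∀ k cnt tail,
    (match bInner c n k cnt with
     | (some r, _, _) => r
     | (none, k', cnt') => gLoop tail k' cnt') = gLoop (List.replicate n c ++ tail) k cnt := by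
  induction n with
  | zero => intro k cnt tail; rfl
  | succ n ih =>
    intro k cnt tail
    simp only [bInner, List.replicate, List.cons_append, gLoop]
    split_ifs with h
    · rfl
    · exact ih _ _ _

theorem bOuter_eq_gLoop (bucket : PySem.Dict Int Int) (cs : List Int) : ∀ k cnt,
    bOuter bucket cs k cnt = gLoop (cs.flatMap fun c => List.replicate (bucket.getD c 0).toNat c) k cnt := by
  induction cs with
  | nil => intro k cnt; rfl
  | cons c cs ih =>
    intro k cnt
    simp only [bOuter, List.flatMap_cons]
    rw [← bInner_eq_gLoop c (bucket.getD c 0).toNat k cnt]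
    cases h : bInner c (bucket.getD c 0).toNat k cnt with
    | mk o p =>
      cases o with
      | some r => rfl
      | none => obtain ⟨k', cnt'⟩ := p; exact ih _ _

theorem count_flatMap_replicate (l : List Int) (xs : List Int) (v : Int) (hnd : l.Nodup) :
    (l.flatMap fun c => List.replicate (xs.count c) c).count v = if v ∈ l then xs.count v else 0 := by
  induction l with
  | nil => simp
  | cons c l ih =>
    rcases List.nodup_cons.mp hnd with ⟨hc, hnd'⟩
    simp only [List.flatMap_cons, List.count_append, List.count_replicate, ih hnd', List.mem_cons]
    by_cases hv : v = c
    · subst hv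
      simp [hc]
    · simp [hv, Ne.symm hv]

theorem nodup_pyRange_down (n : Int) : (PySem.List.pyRange n 0 (-1)).Nodup := by
  rw [PySem.List.pyRange_neg_one_eq_reverse]
  exact List.nodup_reverse.mpr (PySem.List.nodup_pyRange_one _ _)

theorem pairwise_gt_pyRange_down (n : Int) : (PySem.List.pyRange n 0 (-1)).Pairwise (· > ·) := by
  rw [PySem.List.pyRange_neg_one_eq_reverse]
  exact List.pairwise_reverse.mpr (PySem.List.pairwise_lt_pyRange_one _ _)

theorem flatMap_replicate_perm (xs : List Int) (n : Int) (h : ∀ v ∈ xs, 1 ≤ v ∧ v ≤ n) :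
    ((PySem.List.pyRange n 0 (-1)).flatMap fun c => List.replicate (xs.count c) c).Perm xs := by
  rw [List.perm_iff_count]
  intro v
  rw [count_flatMap_replicate _ _ _ (nodup_pyRange_down n)]
  by_cases hv : v ∈ PySem.List.pyRange n 0 (-1)
  · simp [hv]
  · simp only [hv, if_false]
    symm
    rw [List.count_eq_zero]
    intro hmem
    have h1 := (h v hmem).1
    exact hv (PySem.List.mem_pyRange_neg_one.mpr ⟨by omega, (h v hmem).2⟩)

theorem flatMap_replicate_pairwise (xs : List Int) (n : Int) :
    ((PySem.List.pyRange n 0 (-1)).flatMap fun c => List.replicate (xs.count c) c).Pairwise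
      (fun a b => b ≤ a) := by
  apply List.pairwise_flatMap.mpr
  constructor
  · intro c _
    exact List.pairwise_replicate.mpr (Or.inr le_rfl)
  · apply List.Pairwise.imp ?_ (pairwise_gt_pyRange_down n)
    intro a b hab x hx y hy
    rw [List.eq_of_mem_replicate hx, List.eq_of_mem_replicate hy]
    exact le_of_lt hab

-- the descending list of counts that A sorts and B buckets are the SAME list
theorem map_snd_sorted_eq (t : List Int) :
    (PySem.List.sorted (PySem.Dict.counter t).items (fun x => x.2) true).map Prod.snd
      = (PySem.List.pyRange (t.length : Int) 0 (-1)).flatMap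
          (fun c => List.replicate
            (((PySem.Set.ofList t).map (fun v => ((t.count v : Nat) : Int))).count c) c) := by
  set vals : List Int := (PySem.Set.ofList t).map (fun v => ((t.count v : Nat) : Int)) with hv
  have hbound : ∀ v ∈ vals, 1 ≤ v ∧ v ≤ (t.length : Int) := by
    intro v hvm
    rw [hv, List.mem_map] at hvm
    obtain ⟨u, hu, rfl⟩ := hvm
    have hu' : u ∈ t := (PySem.Set.mem_ofList t u).mp hu
    have h1 : 0 < t.count u := List.count_pos_iff.mpr hu'
    have h2 : t.count u ≤ t.length := List.count_le_length
    constructor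
    · exact_mod_cast h1
    · exact_mod_cast h2
  have hitems : (PySem.Dict.counter t).items.map Prod.snd = vals := by
    rw [PySem.Dict.items_counter, List.map_map]
    rfl
  have hS_perm :
      ((PySem.List.sorted (PySem.Dict.counter t).items (fun x => x.2) true).map Prod.snd).Perm vals := by
    rw [← hitems]
    exact (PySem.List.sorted_perm _ _ _).map Prod.snd
  have hR_perm := flatMap_replicate_perm vals (t.length : Int) hbound
  have hS_pair :
      ((PySem.List.sorted (PySem.Dict.counter t).items (fun x => x.2) true).map Prod.snd).Pairwise
        (fun a b => b ≤ a) :=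
    List.pairwise_map.mpr (PySem.List.sorted_pairwise_rev _ _)
  have hR_pair := flatMap_replicate_pairwise vals (t.length : Int)
  apply PySem.List.eq_of_perm_of_pairwise_le_of_injective (fun x : Int => -x) neg_injective
    (hS_perm.trans hR_perm.symm)
  · exact hS_pair.imp (fun h => neg_le_neg h)
  · exact hR_pair.imp (fun h => neg_le_neg h)

theorem values_counter_eq (t : List Int) :
    (PySem.Dict.counter t).values = (PySem.Set.ofList t).map (fun v => ((t.count v : Nat) : Int)) := by
  show (PySem.Dict.counter t).items.map Prod.snd = _
  rw [PySem.Dict.items_counter, List.map_map]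
  rfl

-- ===== VERDICT (by name: the statement is the Claim_ definition above) =====
theorem solution_spec : Claim_equal_solution := by
  intro k t _ _
  unfold Spec_solution solution solution_alt
  simp only [aLoop_eq_gLoop, bOuter_eq_gLoop, values_counter_eq, PySem.Dict.getD_counter,
    Int.toNat_natCast]
  rw [map_snd_sorted_eq]
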